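-- pv_equiv track=rewrite | github.com/1r0nw1ll/quantum-arithmetic-research | qa_guarded_operator_category_v1/validator.py | _eval_word_matrix
-- ===== SOURCE A (Python) =====
-- from typing import Any, Dict, Iterable, List, Optional, Sequence, Tuple
--
-- Matrix2 = Tuple[Tuple[int, int], Tuple[int, int]]
--
-- def _mat_mul(a: Matrix2, b: Matrix2) -> Matrix2:
--     return (
--         (
--             a[0][0] * b[0][0] + a[0][1] * b[1][0],
--             a[0][0] * b[0][1] + a[0][1] * b[1][1],
--         ),
--         (
--             a[1][0] * b[0][0] + a[1][1] * b[1][0],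
--             a[1][0] * b[0][1] + a[1][1] * b[1][1],
--         ),
--     )
--
-- def _eval_word_matrix(word: Sequence[str], ms: Matrix2, mm: Matrix2) -> Matrix2:
--     acc: Matrix2 = ((1, 0), (0, 1))
--     for token in word:
--         if token == "sigma":
--             acc = _mat_mul(ms, acc)
--         elif token == "mu":
--             acc = _mat_mul(mm, acc)
--         else:
--             raise ValueError(f"unknown token: {token}")
--     return acc
-- ===== SOURCE B (Python) =====
-- from typing import Sequence, Tuple
--
-- Matrix2 = Tuple[Tuple[int, int], Tuple[int, int]]
--
-- def _mat_mul(a: Matrix2, b: Matrix2) -> Matrix2: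
--     return (
--         (
--             a[0][0] * b[0][0] + a[0][1] * b[1][0],
--             a[0][0] * b[0][1] + a[0][1] * b[1][1],
--         ),
--         (
--             a[1][0] * b[0][0] + a[1][1] * b[1][0],
--             a[1][0] * b[0][1] + a[1][1] * b[1][1],
--         ),
--     )
--
-- def _eval_word_matrix(word: Sequence[str], ms: Matrix2, mm: Matrix2) -> Matrix2:
--     def go(lo: int, hi: int) -> Matrix2:
--         if hi - lo == 0:
--             return ((1, 0), (0, 1))
--         if hi - lo == 1:
--             token = word[lo]
--             if token == "sigma":
--                 return ms
--             if token == "mu":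
--                 return mm
--             raise ValueError(f"unknown token: {token}")
--         mid = (lo + hi) // 2
--         left = go(lo, mid)
--         right = go(mid, hi)
--         return _mat_mul(right, left)
--     return go(0, len(word))
-- ===== Notes on version B (the rewrite author's own statement) =====
-- stated objective: alternative
-- what changed: Replaces the left-to-right iterative fold with a divide-and-conquer tree reduction: a recursive helper returns the identity on an empty slice, the token's matrix on a singleton, and otherwise combines the recursively computed half-products as right@left.
import Mathlib
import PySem

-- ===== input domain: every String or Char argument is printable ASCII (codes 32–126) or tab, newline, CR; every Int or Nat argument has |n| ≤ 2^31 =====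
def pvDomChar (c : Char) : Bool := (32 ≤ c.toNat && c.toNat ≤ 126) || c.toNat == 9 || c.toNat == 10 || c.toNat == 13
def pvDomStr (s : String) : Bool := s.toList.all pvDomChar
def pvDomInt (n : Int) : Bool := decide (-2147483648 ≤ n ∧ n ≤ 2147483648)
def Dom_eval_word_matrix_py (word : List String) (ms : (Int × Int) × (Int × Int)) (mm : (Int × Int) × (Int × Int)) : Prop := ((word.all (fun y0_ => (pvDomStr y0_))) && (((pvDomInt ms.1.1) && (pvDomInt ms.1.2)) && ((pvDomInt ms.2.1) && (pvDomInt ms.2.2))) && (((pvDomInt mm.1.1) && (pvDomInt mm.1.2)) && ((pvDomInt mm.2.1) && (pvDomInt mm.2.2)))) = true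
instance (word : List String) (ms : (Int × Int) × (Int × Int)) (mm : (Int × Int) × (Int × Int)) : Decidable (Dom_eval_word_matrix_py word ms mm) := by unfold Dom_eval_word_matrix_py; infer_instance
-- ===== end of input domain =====

-- B replaces A's left-to-right fold by a divide-and-conquer tree reduction over index slices (alternative decomposition, same cost).


-- ===== PORT A =====
-- _mat_mul, shared helper of both Pythons
def matMul (a b : (Int × Int) × (Int × Int)) : (Int × Int) × (Int × Int) :=
  ((a.1.1 * b.1.1 + a.1.2 * b.2.1, a.1.1 * b.1.2 + a.1.2 * b.2.2),
   (a.2.1 * b.1.1 + a.2.2 * b.2.1, a.2.1 * b.1.2 + a.2.2 * b.2.2))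

-- A: left-to-right fold; on an unknown token Python raises ValueError (excluded by Pre_),
-- the port leaves acc unchanged there.
def eval_word_matrix_py (word : List String) (ms : (Int × Int) × (Int × Int)) (mm : (Int × Int) × (Int × Int)) : (Int × Int) × (Int × Int) :=
  word.foldl (fun acc token =>
    if token = "sigma" then matMul ms acc
    else if token = "mu" then matMul mm acc
    else acc) ((1, 0), (0, 1))

-- ===== PORT B =====
-- B's recursive slice helper (Source B's go(lo,hi), transcribed on the sublist hi-lo elements long):
-- identity on an empty slice, the token's matrix on a singleton (identity where Python raises,
-- outside Pre_), else matMul of the right half-product with the left half-product.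
def evalSlice (ms mm : (Int × Int) × (Int × Int)) : List String → (Int × Int) × (Int × Int)
  | [] => ((1, 0), (0, 1))
  | [token] =>
      if token = "sigma" then ms
      else if token = "mu" then mm
      else ((1, 0), (0, 1))  -- Python raises ValueError here; outside Pre_
  | a :: b :: rest =>
      let mid := (a :: b :: rest).length / 2
      let left := evalSlice ms mm ((a :: b :: rest).take mid)
      let right := evalSlice ms mm ((a :: b :: rest).drop mid)
      matMul right left
termination_by w => w.length
decreasing_by
  · simp [List.length_take]; omega
  · simp; omega

def eval_word_matrix_py_alt (word : List String) (ms : (Int × Int) × (Int × Int)) (mm : (Int × Int) × (Int × Int)) : (Int × Int) × (Int × Int) :=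
  evalSlice ms mm word

-- ===== PRECONDITION & SPEC =====
-- Pre_ excludes exactly the words containing a token other than "sigma"/"mu", on which both
-- Pythons raise ValueError.
def Pre_eval_word_matrix_py (word : List String) (_ms : (Int × Int) × (Int × Int)) (_mm : (Int × Int) × (Int × Int)) : Prop :=
  ∀ t ∈ word, t = "sigma" ∨ t = "mu"
instance (word : List String) (ms : (Int × Int) × (Int × Int)) (mm : (Int × Int) × (Int × Int)) : Decidable (Pre_eval_word_matrix_py word ms mm) := by unfold Pre_eval_word_matrix_py; infer_instance

def pvWitness_eval_word_matrix_py : List String × ((Int × Int) × (Int × Int)) × ((Int × Int) × (Int × Int)) :=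
  (["sigma", "mu", "sigma"], ((1, 1), (0, 1)), ((1, 0), (1, 1)))

def Spec_eval_word_matrix_py (word : List String) (ms : (Int × Int) × (Int × Int)) (mm : (Int × Int) × (Int × Int)) (out : (Int × Int) × (Int × Int)) : Prop := out = eval_word_matrix_py_alt word ms mm
instance (word : List String) (ms : (Int × Int) × (Int × Int)) (mm : (Int × Int) × (Int × Int)) (out : (Int × Int) × (Int × Int)) : Decidable (Spec_eval_word_matrix_py word ms mm out) := by unfold Spec_eval_word_matrix_py; infer_instance

-- ===== CLAIM (what is proved, stated in full; the proofs are below) =====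
def Claim_equal_eval_word_matrix_py : Prop := ∀ (word : List String) (ms : (Int × Int) × (Int × Int)) (mm : (Int × Int) × (Int × Int)), Dom_eval_word_matrix_py word ms mm → Pre_eval_word_matrix_py word ms mm → Spec_eval_word_matrix_py word ms mm (eval_word_matrix_py word ms mm)

-- ===== LEMMAS AND PROOFS =====

theorem matMul_one_right (a : (Int × Int) × (Int × Int)) : matMul a ((1, 0), (0, 1)) = a := by
  simp [matMul]

theorem matMul_one_left (a : (Int × Int) × (Int × Int)) : matMul ((1, 0), (0, 1)) a = a := by
  simp [matMul]

theorem matMul_assoc (a b c : (Int × Int) × (Int × Int)) :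
    matMul (matMul a b) c = matMul a (matMul b c) := by
  simp only [matMul, Prod.mk.injEq]
  refine ⟨⟨by ring, by ring⟩, by ring, by ring⟩

-- A's fold started from any acc equals the fold from the identity times acc.
theorem foldA_shift (ms mm : (Int × Int) × (Int × Int)) (w : List String)
    (acc : (Int × Int) × (Int × Int)) :
    w.foldl (fun acc token =>
      if token = "sigma" then matMul ms acc
      else if token = "mu" then matMul mm acc
      else acc) acc
    = matMul (eval_word_matrix_py w ms mm) acc := by
  induction w generalizing acc with
  | nil => simp [eval_word_matrix_py, matMul_one_left]
  | cons t ts ih =>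
    simp only [eval_word_matrix_py, List.foldl_cons] at *
    rw [ih, ih (if t = "sigma" then matMul ms ((1,0),(0,1)) else if t = "mu" then matMul mm ((1,0),(0,1)) else ((1,0),(0,1)))]
    split_ifs <;> simp [matMul_one_right, matMul_assoc]

theorem foldA_append (ms mm : (Int × Int) × (Int × Int)) (l r : List String) :
    eval_word_matrix_py (l ++ r) ms mm
    = matMul (eval_word_matrix_py r ms mm) (eval_word_matrix_py l ms mm) := by
  simp only [eval_word_matrix_py, List.foldl_append]
  exact foldA_shift ms mm r _

theorem evalSlice_eq (ms mm : (Int × Int) × (Int × Int)) (w : List String) :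
    evalSlice ms mm w = eval_word_matrix_py w ms mm := by
  induction w using evalSlice.induct ms mm with
  | case1 => simp [evalSlice, eval_word_matrix_py]
  | case2 => simp [evalSlice, eval_word_matrix_py, matMul_one_right]
  | case3 h => simp [evalSlice, eval_word_matrix_py, matMul_one_right]
  | case4 token h1 h2 => simp [evalSlice, eval_word_matrix_py, h1, h2]
  | case5 a b rest mid ihl ihr =>
    have hm : mid = (a :: b :: rest).length / 2 := rfl
    rw [hm] at ihl ihr
    rw [evalSlice, ihl, ihr, ← foldA_append, List.take_append_drop]

-- ===== VERDICT (by name: the statement is the Claim_ definition above) =====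
theorem eval_word_matrix_py_spec : Claim_equal_eval_word_matrix_py := by
  intro word ms mm _ _
  unfold Spec_eval_word_matrix_py eval_word_matrix_py_alt
  rw [evalSlice_eq]
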